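-- pv_equiv track=rewrite | github.com/AR15-mayker/lesson1 | block6/main104.py | cut_squares
-- ===== SOURCE A (Python) =====
-- def cut_squares(a, b):
--     squares = []  # Список для хранения количества квадратов и их размеров
--     while a != 0 and b != 0:
--         if a > b:
--             count = a // b  # Количество квадратов со стороной b
--             squares.append((b, count))  # Добавляем размер и количество
--             a = a % b  # Оставшийся прямоугольник
--         else:
--             count = b // a  # Количество квадратов со стороной a
--             squares.append((a, count))  # Добавляем размер и количество
--             b = b % a  # Оставшийся прямоугольник
--     return squares
-- ===== SOURCE B (Python) =====
-- def cut_squares(a, b):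
--     # Normalize the rectangle to an ordered pair (lo, hi) once, then recurse on
--     # the order-free state: each step emits (lo, hi // lo) and re-sorts (lo, hi % lo).
--     def go(lo, hi):
--         if lo == 0 or hi == 0:
--             return []
--         r = hi % lo
--         return [(lo, hi // lo)] + go(min(lo, r), max(lo, r))
--     return go(min(a, b), max(a, b))
-- ===== Notes on version B (the rewrite author's own statement) =====
-- stated objective: alternative
-- what changed: A's while-loop that branches on a > b each iteration and appends to an accumulator is replaced by a recursion over an order-free state: the pair is sorted once to (lo, hi), each step emits (lo, hi // lo) and re-sorts (lo, hi % lo), removing the comparison branch and the accumulator.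
import Mathlib
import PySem

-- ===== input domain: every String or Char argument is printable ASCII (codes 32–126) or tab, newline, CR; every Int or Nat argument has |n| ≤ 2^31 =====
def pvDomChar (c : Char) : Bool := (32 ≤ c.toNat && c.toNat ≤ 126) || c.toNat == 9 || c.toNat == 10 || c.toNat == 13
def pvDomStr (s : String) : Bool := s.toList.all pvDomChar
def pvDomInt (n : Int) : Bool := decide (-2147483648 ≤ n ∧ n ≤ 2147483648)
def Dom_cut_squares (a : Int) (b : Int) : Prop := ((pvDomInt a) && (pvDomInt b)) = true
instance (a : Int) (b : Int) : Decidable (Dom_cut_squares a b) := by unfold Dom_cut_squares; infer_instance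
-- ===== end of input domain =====

-- B replaces A's while-loop (which branches on a > b each iteration and appends to an
-- accumulator) by a recursion over an order-free sorted state (lo, hi): emit
-- (lo, hi // lo), re-sort (lo, hi % lo) — alternative decomposition, same cost.
-- Both ports are total via a fuel parameter sufficient wherever the Python programs
-- return; on inputs where the Pythons never return (certain negative sides) nothing
-- is claimed about the Pythons, and the two ports still agree since they share the
-- fuel and the same Euclidean state multiset.

-- ===== PORT A =====
-- A's while-loop, step for step: condition, branch on a > b, append to the accumulator.
def cutLoopA : Nat → Int → Int → List (Int × Int) → List (Int × Int)
  | 0, _, _, squares => squares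
  | fuel + 1, a, b, squares =>
    if a ≠ 0 ∧ b ≠ 0 then
      if a > b then
        cutLoopA fuel (PySem.Int.mod a b) b (squares ++ [(b, PySem.Int.floordiv a b)])
      else
        cutLoopA fuel a (PySem.Int.mod b a) (squares ++ [(a, PySem.Int.floordiv b a)])
    else squares

def cut_squares (a : Int) (b : Int) : List (Int × Int) :=
  cutLoopA (a.toNat + b.toNat + 1) a b []

-- ===== PORT B =====
-- B's helper go over the sorted state (lo, hi): base case on a zero side, then emit
-- the tile (lo, hi // lo) and recurse on the re-sorted pair of lo and hi % lo.
def cutGo : Nat → Int → Int → List (Int × Int)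
  | 0, _, _ => []
  | fuel + 1, lo, hi =>
    if lo = 0 ∨ hi = 0 then []
    else
      (lo, PySem.Int.floordiv hi lo) ::
        cutGo fuel (min lo (PySem.Int.mod hi lo)) (max lo (PySem.Int.mod hi lo))

def cut_squares_alt (a : Int) (b : Int) : List (Int × Int) :=
  cutGo (a.toNat + b.toNat + 1) (min a b) (max a b)

-- ===== PRECONDITION & SPEC =====
def Spec_cut_squares (a : Int) (b : Int) (out : List (Int × Int)) : Prop := out = cut_squares_alt a b
instance (a : Int) (b : Int) (out : List (Int × Int)) : Decidable (Spec_cut_squares a b out) := by unfold Spec_cut_squares; infer_instance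

-- ===== CLAIM (what is proved, stated in full; the proofs are below) =====
def Claim_equal_cut_squares : Prop := ∀ (a : Int) (b : Int), Dom_cut_squares a b → Spec_cut_squares a b (cut_squares a b)

-- ===== LEMMAS AND PROOFS =====

-- A's loop state (a, b) and B's sorted state (min a b, max a b) carry the same
-- multiset; with equal fuel the loop produces the accumulator followed by go's list.
theorem cutLoopA_eq_go (fuel : Nat) :
    ∀ (a b : Int) (acc : List (Int × Int)),
      cutLoopA fuel a b acc = acc ++ cutGo fuel (min a b) (max a b) := by
  induction fuel with
  | zero => intro a b acc; simp [cutLoopA, cutGo]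
  | succ n ih =>
    intro a b acc
    by_cases h : a = 0 ∨ b = 0
    · have h' : ¬ (a ≠ 0 ∧ b ≠ 0) := by tauto
      have h'' : min a b = 0 ∨ max a b = 0 := by
        rcases le_total a b with hle | hle <;>
          simp [hle] <;> tauto
      simp [cutLoopA, cutGo, h', h'']
    · have h' : a ≠ 0 ∧ b ≠ 0 := by tauto
      have h'' : ¬ (min a b = 0 ∨ max a b = 0) := by
        rcases le_total a b with hle | hle <;>
          simp [hle] <;> tauto
      by_cases hab : a > b
      · have hmin : min a b = b := min_eq_right (le_of_lt hab)
        have hmax : max a b = a := max_eq_left (le_of_lt hab)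
        simp [cutLoopA, cutGo, h', hab, hmin, hmax, ih,
              min_comm b (PySem.Int.mod a b), max_comm b (PySem.Int.mod a b)]
      · have hle : a ≤ b := le_of_not_gt hab
        have hmin : min a b = a := min_eq_left hle
        have hmax : max a b = b := max_eq_right hle
        simp [cutLoopA, cutGo, h', hab, hmin, hmax, ih]

-- ===== VERDICT (by name: the statement is the Claim_ definition above) =====
theorem cut_squares_spec : Claim_equal_cut_squares := by
  intro a b _
  unfold Spec_cut_squares cut_squares cut_squares_alt
  simpa using cutLoopA_eq_go (a.toNat + b.toNat + 1) a b []
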